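-- pv_equiv track=rewrite | github.com/tehnix53/random_placeholders | pipeline.py | cut_border
-- ===== SOURCE A (Python) =====
-- def cut_border(some_array):
--     border = []
--     for i in range(len(some_array)):
--         if True in some_array[i]:
--             border += [i]
--     maximum = max(border) + 1
--     if min(border) - 1 >= 0:
--         minimum = min(border) - 1
--     else:
--         minimum = min(border)
--     return (minimum, maximum)
-- ===== SOURCE B (Python) =====
-- def cut_border(some_array):
--     first = next(i for i, row in enumerate(some_array) if True in row)
--     last = len(some_array) - 1 - next(i for i, row in enumerate(reversed(some_array)) if True in row)
--     return (max(0, first - 1), last + 1)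
-- ===== Notes on version B (the rewrite author's own statement) =====
-- stated objective: alternative
-- what changed: Instead of collecting the whole list of True-row indices and reducing it with max/min, B scans forward for the first True row and backward (via reversed) for the last one, stopping early, and computes (max(0, first-1), last+1) directly.
import Mathlib
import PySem

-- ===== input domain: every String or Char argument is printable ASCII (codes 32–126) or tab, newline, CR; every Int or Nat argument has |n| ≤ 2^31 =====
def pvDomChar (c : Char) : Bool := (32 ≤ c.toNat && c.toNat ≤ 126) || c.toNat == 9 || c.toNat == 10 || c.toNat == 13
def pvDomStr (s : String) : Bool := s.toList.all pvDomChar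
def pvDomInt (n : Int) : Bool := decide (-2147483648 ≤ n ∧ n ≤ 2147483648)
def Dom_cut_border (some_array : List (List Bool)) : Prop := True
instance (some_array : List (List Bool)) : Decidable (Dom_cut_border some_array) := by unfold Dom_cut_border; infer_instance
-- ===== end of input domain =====

-- B replaces A's collect-all-indices-then-max/min pass by two directed early-exit scans
-- (first True row from the front, last True row via the reversed list); equivalence is on
-- inputs with at least one True row (elsewhere A raises ValueError on max([])).

-- ===== PORT A =====
-- max(border)/min(border): Python raises ValueError on an empty list; the port uses
-- .getD 0 there, and exactly those inputs are excluded by Pre_cut_border.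
def cut_border (some_array : List (List Bool)) : Int × Int :=
  let border : List Int := (PySem.List.pyRange 0 (some_array.length : Int) 1).foldl
      (fun b i => if true ∈ PySem.List.pyGetD some_array i [] then b ++ [i] else b) []
  let maximum : Int := (PySem.List.max? border (fun x => x)).getD 0 + 1
  let minimum : Int :=
    if (PySem.List.min? border (fun x => x)).getD 0 - 1 ≥ 0 then
      (PySem.List.min? border (fun x => x)).getD 0 - 1
    else
      (PySem.List.min? border (fun x => x)).getD 0
  (minimum, maximum)

-- ===== PORT B =====
-- 'next(i for i, row in enumerate(l) if True in row)': first index whose row contains True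
-- (none = StopIteration; those inputs are outside Pre_cut_border, the port uses .getD 0 there).
def firstTrueIdx : List (List Bool) → Option Nat
  | [] => none
  | r :: rs => if true ∈ r then some 0 else (firstTrueIdx rs).map (· + 1)

def cut_border_alt (some_array : List (List Bool)) : Int × Int :=
  let first : Int := ((firstTrueIdx some_array).getD 0 : Nat)
  let lastIdx : Int :=
    (some_array.length : Int) - 1 - ((firstTrueIdx some_array.reverse).getD 0 : Nat)
  (max 0 (first - 1), lastIdx + 1)

-- ===== PRECONDITION & SPEC =====
-- Pre_ excludes exactly the inputs with no True entry, on which Python A raises ValueError (max of empty list).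
def Pre_cut_border (some_array : List (List Bool)) : Prop := ∃ r ∈ some_array, true ∈ r
instance (some_array : List (List Bool)) : Decidable (Pre_cut_border some_array) := by
  unfold Pre_cut_border; infer_instance
def pvWitness_cut_border : List (List Bool) := [[false, true], [false]]

def Spec_cut_border (some_array : List (List Bool)) (out : Int × Int) : Prop := out = cut_border_alt some_array
instance (some_array : List (List Bool)) (out : Int × Int) : Decidable (Spec_cut_border some_array out) := by unfold Spec_cut_border; infer_instance

-- ===== CLAIM (what is proved, stated in full; the proofs are below) =====
def Claim_equal_cut_border : Prop := ∀ (some_array : List (List Bool)), Dom_cut_border some_array → Pre_cut_border some_array → Spec_cut_border some_array (cut_border some_array)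

-- ===== LEMMAS AND PROOFS =====

theorem firstTrueIdx_isSome {xs : List (List Bool)} (h : ∃ r ∈ xs, true ∈ r) :
    ∃ k, firstTrueIdx xs = some k := by
  induction xs with
  | nil => simp at h
  | cons r rs ih =>
    by_cases hr : true ∈ r
    · exact ⟨0, by simp [firstTrueIdx, hr]⟩
    · obtain ⟨s, hs, ht⟩ := h
      rcases List.mem_cons.mp hs with hs | hs
      · exact absurd (hs ▸ ht) hr
      · obtain ⟨k, hk⟩ := ih ⟨s, hs, ht⟩
        exact ⟨k + 1, by simp [firstTrueIdx, hr, hk]⟩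

theorem firstTrueIdx_spec {xs : List (List Bool)} {k : Nat}
    (h : firstTrueIdx xs = some k) :
    k < xs.length ∧ true ∈ xs.getD k [] ∧ ∀ j, j < k → true ∉ xs.getD j [] := by
  induction xs generalizing k with
  | nil => simp [firstTrueIdx] at h
  | cons r rs ih =>
    by_cases hr : true ∈ r
    · simp [firstTrueIdx, hr] at h
      subst h
      exact ⟨by simp, by simpa using hr, by omega⟩
    · simp [firstTrueIdx, hr] at h
      obtain ⟨k', hk', rfl⟩ := h
      obtain ⟨h1, h2, h3⟩ := ih hk'
      refine ⟨by simpa using h1, by simpa using h2, ?_⟩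
      intro j hj
      cases j with
      | zero => simpa using hr
      | succ j' => simpa using h3 j' (by omega)

theorem getD_reverse {xs : List (List Bool)} {j : Nat} (hj : j < xs.length) :
    xs.reverse.getD j [] = xs.getD (xs.length - 1 - j) [] := by
  rw [List.getD_eq_getElem _ _ (by simpa using hj),
      List.getD_eq_getElem _ _ (by omega), List.getElem_reverse]

theorem mem_border {xs : List (List Bool)} {i : Int} :
    (i ∈ (PySem.List.pyRange 0 (xs.length : Int) 1).filter
        (fun i => decide (true ∈ PySem.List.pyGetD xs i []))) ↔
      ∃ k : Nat, k < xs.length ∧ i = (k : Int) ∧ true ∈ xs.getD k [] := by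
  simp only [List.mem_filter, PySem.List.mem_pyRange_one, decide_eq_true_eq]
  constructor
  · rintro ⟨⟨h0, hn⟩, hmem⟩
    refine ⟨i.toNat, by omega, by omega, ?_⟩
    have : i = ((i.toNat : Nat) : Int) := by omega
    rwa [this, PySem.List.pyGetD_natCast] at hmem
  · rintro ⟨k, hk, rfl, hmem⟩
    exact ⟨⟨by omega, by omega⟩, by rwa [PySem.List.pyGetD_natCast]⟩

theorem cut_border_spec : Claim_equal_cut_border := by
  intro xs _ hpre
  simp only [Spec_cut_border, cut_border, cut_border_alt]
  obtain ⟨k, hk⟩ := firstTrueIdx_isSome hpre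
  have hpre' : ∃ r ∈ xs.reverse, true ∈ r := by
    obtain ⟨r, hr, ht⟩ := hpre; exact ⟨r, by simpa using hr, ht⟩
  obtain ⟨g, hg⟩ := firstTrueIdx_isSome hpre'
  obtain ⟨hk1, hk2, hk3⟩ := firstTrueIdx_spec hk
  obtain ⟨hg1, hg2, hg3⟩ := firstTrueIdx_spec hg
  rw [List.length_reverse] at hg1
  rw [getD_reverse (by omega)] at hg2
  set n := xs.length with hn
  set border := (PySem.List.pyRange 0 (n : Int) 1).foldl
      (fun b i => if true ∈ PySem.List.pyGetD xs i [] then b ++ [i] else b) ([] : List Int)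
    with hborder
  have hbf : border = (PySem.List.pyRange 0 (n : Int) 1).filter
      (fun i => decide (true ∈ PySem.List.pyGetD xs i [])) := by
    rw [hborder, PySem.List.foldl_append_ite_eq_filter]; simp
  have hmemk : (k : Int) ∈ border := by
    rw [hbf]; exact mem_border.mpr ⟨k, hk1, rfl, hk2⟩
  have hmeml : ((n - 1 - g : Nat) : Int) ∈ border := by
    rw [hbf]; exact mem_border.mpr ⟨n - 1 - g, by omega, rfl, hg2⟩
  -- min(border) = k
  obtain ⟨m, hm⟩ : ∃ m, PySem.List.min? border (fun x => x) = some m := by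
    cases hmin : PySem.List.min? border (fun x => x) with
    | none =>
      rw [PySem.List.min?_eq_none_iff] at hmin
      rw [hmin] at hmemk; simp at hmemk
    | some m => exact ⟨m, rfl⟩
  have hmk : m = (k : Int) := by
    have hle : m ≤ (k : Int) := PySem.List.min?_isMin hm _ hmemk
    have hmmem : m ∈ border := PySem.List.min?_mem hm
    rw [hbf] at hmmem
    obtain ⟨j, hj1, rfl, hj3⟩ := mem_border.mp hmmem
    have : ¬ j < k := fun hlt => hk3 j hlt hj3
    omega
  -- max(border) = n - 1 - g
  obtain ⟨M, hM⟩ : ∃ M, PySem.List.max? border (fun x => x) = some M := by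
    cases hmax : PySem.List.max? border (fun x => x) with
    | none =>
      rw [PySem.List.max?_eq_none_iff] at hmax
      rw [hmax] at hmemk; simp at hmemk
    | some M => exact ⟨M, rfl⟩
  have hML : M = ((n - 1 - g : Nat) : Int) := by
    have hle : ((n - 1 - g : Nat) : Int) ≤ M := PySem.List.max?_isMax hM _ hmeml
    have hMmem : M ∈ border := PySem.List.max?_mem hM
    rw [hbf] at hMmem
    obtain ⟨j, hj1, rfl, hj3⟩ := mem_border.mp hMmem
    by_contra hne
    have hjgt : n - 1 - g < j := by omega
    have hrev : true ∈ xs.reverse.getD (n - 1 - j) [] := by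
      rw [getD_reverse (by omega)]
      have : n - 1 - (n - 1 - j) = j := by omega
      rwa [this]
    exact hg3 (n - 1 - j) (by omega) hrev
  simp only [hk, hg, hm, hM, hmk, hML, Option.getD_some]
  refine Prod.ext ?_ ?_
  · show (if (k:Int) - 1 ≥ 0 then (k:Int) - 1 else (k:Int)) = max 0 ((k:Int) - 1)
    split_ifs with h1 <;> omega
  · show ((n - 1 - g : Nat) : Int) + 1 = (n:Int) - 1 - (g:Int) + 1
    omega

-- ===== VERDICT (by name: the statement is the Claim_ definition above) =====
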